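-- pv_equiv track=rewrite | github.com/mattblferrer/competitive-programming | project_euler/051-100/090.py | check_cubes
-- ===== SOURCE A (Python) =====
-- squares = ((0, 1),(0, 4),(0, 9),(1, 6),(2, 5),(3, 6),(4, 9),(6, 4),(8, 1))
--
-- def check_cubes(cube_1: tuple[int], cube_2: tuple[int]) -> bool:
--     """returns True if all squares can be made using arrangements of the two
--     cubes' digits, and False otherwise"""
--     # if cube has 6, add 9 and vice versa
--     cube_1, cube_2 = set(cube_1), set(cube_2)
--     for cube in (cube_1, cube_2):
--         if (6 in cube) ^ (9 in cube):
--             cube.update({6, 9})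
--
--     for square in squares:  # iterate through squares to see if they're formed
--         if square[0] in cube_1 and square[1] in cube_2:
--             continue
--         elif square[1] in cube_1 and square[0] in cube_2:
--             continue
--         return False
--     return True  # if tests passed for all squares
-- ===== SOURCE B (Python) =====
-- squares = ((0, 1),(0, 4),(0, 9),(1, 6),(2, 5),(3, 6),(4, 9),(6, 4),(8, 1))
--
-- SQUARE_DIGITS = {d for sq in squares for d in sq}
--
-- def check_cubes(cube_1, cube_2) -> bool:
--     """returns True if all squares can be made using arrangements of the two
--     cubes' digits, and False otherwise"""
--     def norm(cube):
--         # only digits that occur in some square can ever matter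
--         s = set(cube) & SQUARE_DIGITS
--         if (6 in s) ^ (9 in s):
--             s.update({6, 9})
--         return s
--     c1, c2 = norm(cube_1), norm(cube_2)
--     # table of all formable unordered digit pairs
--     formable = {frozenset((x, y)) for x in c1 for y in c2}
--     return all(frozenset(sq) in formable for sq in squares)
-- ===== Notes on version B (the rewrite author's own statement) =====
-- stated objective: alternative
-- what changed: B restricts each cube to the digits occurring in some square, precomputes the set of all formable unordered digit pairs from the two normalized cubes, and answers each square by a single membership test, instead of A's per-square scan with an explicit both-orderings branch check and early return.
import Mathlib
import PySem

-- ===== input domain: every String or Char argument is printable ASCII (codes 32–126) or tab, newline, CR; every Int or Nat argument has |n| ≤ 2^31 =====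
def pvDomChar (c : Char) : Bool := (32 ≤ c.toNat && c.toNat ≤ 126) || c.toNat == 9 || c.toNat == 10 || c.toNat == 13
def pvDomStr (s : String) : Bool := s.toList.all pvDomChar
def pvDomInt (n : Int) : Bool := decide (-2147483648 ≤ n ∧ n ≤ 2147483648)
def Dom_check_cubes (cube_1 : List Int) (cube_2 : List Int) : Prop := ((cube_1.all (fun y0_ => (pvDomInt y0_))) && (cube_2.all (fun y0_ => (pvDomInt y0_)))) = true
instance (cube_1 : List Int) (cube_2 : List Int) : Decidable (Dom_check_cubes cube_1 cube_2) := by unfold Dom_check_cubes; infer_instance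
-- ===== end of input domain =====

-- B replaces A's per-square both-orderings branch check by a precomputed table of all
-- formable unordered digit pairs, queried by one membership test per square (alternative).

-- ===== PORT A =====
def pySquares : List (Int × Int) :=
  [(0, 1), (0, 4), (0, 9), (1, 6), (2, 5), (3, 6), (4, 9), (6, 4), (8, 1)]

-- 'if (6 in cube) ^ (9 in cube): cube.update({6, 9})' applied to each cube in turn
def sixNine (cube : PySem.Set Int) : PySem.Set Int :=
  if (PySem.Set.contains cube 6) != (PySem.Set.contains cube 9) then
    PySem.Set.update cube [(6 : Int), 9]
  else cube

-- the 'for square in squares' loop with its early 'return False'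
def squaresLoop (c1 c2 : PySem.Set Int) : List (Int × Int) → Bool
  | [] => true
  | sq :: rest =>
    if PySem.Set.contains c1 sq.1 && PySem.Set.contains c2 sq.2 then
      squaresLoop c1 c2 rest
    else if PySem.Set.contains c1 sq.2 && PySem.Set.contains c2 sq.1 then
      squaresLoop c1 c2 rest
    else false

def check_cubes (cube_1 : List Int) (cube_2 : List Int) : Bool :=
  let c1 := sixNine (PySem.Set.ofList cube_1)
  let c2 := sixNine (PySem.Set.ofList cube_2)
  squaresLoop c1 c2 pySquares

-- ===== PORT B =====
-- SQUARE_DIGITS = {d for sq in squares for d in sq}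
def squareDigits : PySem.Set Int :=
  PySem.Set.ofList (pySquares.flatMap (fun sq => [sq.1, sq.2]))

-- Source B's norm helper
def normCube (cube : List Int) : PySem.Set Int :=
  let s := PySem.Set.inter (PySem.Set.ofList cube) squareDigits
  if (PySem.Set.contains s 6) != (PySem.Set.contains s 9) then
    PySem.Set.update s [(6 : Int), 9]
  else s

-- frozenset({x, y}) for distinct x, y, as an ordered normal form
def upair (x y : Int) : Int × Int := if x ≤ y then (x, y) else (y, x)

def check_cubes_alt (cube_1 : List Int) (cube_2 : List Int) : Bool :=
  let c1 := normCube cube_1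
  let c2 := normCube cube_2
  -- the set comprehension {frozenset((x, y)) for x in c1 for y in c2}
  let formable : PySem.Set (Int × Int) :=
    c1.foldl (fun acc x => c2.foldl (fun acc y => PySem.Set.add acc (upair x y)) acc)
      PySem.Set.empty
  pySquares.all (fun sq => PySem.Set.contains formable (upair sq.1 sq.2))

-- ===== PRECONDITION & SPEC =====
def Spec_check_cubes (cube_1 : List Int) (cube_2 : List Int) (out : Bool) : Prop := out = check_cubes_alt cube_1 cube_2
instance (cube_1 : List Int) (cube_2 : List Int) (out : Bool) : Decidable (Spec_check_cubes cube_1 cube_2 out) := by unfold Spec_check_cubes; infer_instance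

-- ===== CLAIM (what is proved, stated in full; the proofs are below) =====
def Claim_equal_check_cubes : Prop := ∀ (cube_1 : List Int) (cube_2 : List Int), Dom_check_cubes cube_1 cube_2 → Spec_check_cubes cube_1 cube_2 (check_cubes cube_1 cube_2)

-- ===== LEMMAS AND PROOFS =====

-- intersecting with the square digits does not change membership of a square digit
theorem contains_inter_digits (s : PySem.Set Int) (a : Int) (ha : a ∈ squareDigits) :
    PySem.Set.contains (PySem.Set.inter s squareDigits) a = PySem.Set.contains s a := by
  rw [Bool.eq_iff_iff]
  simp only [PySem.Set.contains_iff, PySem.Set.mem_inter]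
  exact ⟨fun h => h.1, fun h => ⟨h, ha⟩⟩

theorem normCube_contains (cube : List Int) (a : Int) (ha : a ∈ squareDigits) :
    PySem.Set.contains (normCube cube) a
      = PySem.Set.contains (sixNine (PySem.Set.ofList cube)) a := by
  simp only [normCube, sixNine]
  rw [contains_inter_digits _ 6 (by decide), contains_inter_digits _ 9 (by decide)]
  split_ifs with h
  · rw [Bool.eq_iff_iff]
    simp only [PySem.Set.contains_iff, PySem.Set.mem_update, PySem.Set.mem_inter]
    tauto
  · exact contains_inter_digits _ a ha

-- membership in the pair table
theorem mem_formable (c1 c2 : PySem.Set Int) (s0 : PySem.Set (Int × Int)) (p : Int × Int) :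
    (p ∈ c1.foldl (fun acc x => c2.foldl (fun acc y => PySem.Set.add acc (upair x y)) acc) s0)
      ↔ p ∈ s0 ∨ ∃ x ∈ c1, ∃ y ∈ c2, p = upair x y := by
  induction c1 generalizing s0 with
  | nil => simp
  | cons a t ih =>
    simp only [List.foldl_cons, ih, PySem.Set.mem_foldl_add, List.mem_cons]
    aesop

theorem upair_eq_upair {x y a b : Int} (hab : a ≠ b) :
    upair x y = upair a b ↔ (x = a ∧ y = b) ∨ (x = b ∧ y = a) := by
  unfold upair
  split_ifs with h1 h2 h2 <;>
    · constructor
      · intro h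
        have h3 := congrArg Prod.fst h
        have h4 := congrArg Prod.snd h
        simp at h3 h4
        omega
      · rintro (⟨rfl, rfl⟩ | ⟨rfl, rfl⟩) <;> simp_all <;> omega

-- each square's test in B equals A's both-orderings test
theorem formable_test (c1 c2 : PySem.Set Int) (a b : Int) (hab : a ≠ b) :
    PySem.Set.contains
        (c1.foldl (fun acc x => c2.foldl (fun acc y => PySem.Set.add acc (upair x y)) acc)
          PySem.Set.empty) (upair a b)
      = ((PySem.Set.contains c1 a && PySem.Set.contains c2 b)
          || (PySem.Set.contains c1 b && PySem.Set.contains c2 a)) := by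
  rcases Bool.eq_false_or_eq_true (((PySem.Set.contains c1 a && PySem.Set.contains c2 b)
      || (PySem.Set.contains c1 b && PySem.Set.contains c2 a))) with h | h <;> rw [h]
  swap
  · rw [← Bool.not_eq_true, PySem.Set.contains_iff, mem_formable]
    rintro (hmem | ⟨x, hx, y, hy, hp⟩)
    · simp [PySem.Set.empty] at hmem
    · rw [eq_comm, upair_eq_upair hab] at hp
      rcases hp with ⟨rfl, rfl⟩ | ⟨rfl, rfl⟩ <;> simp at h <;> tauto
  · rw [PySem.Set.contains_iff, mem_formable]
    simp only [Bool.or_eq_true, Bool.and_eq_true, PySem.Set.contains_iff] at h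
    rcases h with ⟨ha, hb⟩ | ⟨hb, ha⟩
    · exact Or.inr ⟨a, ha, b, hb, rfl⟩
    · refine Or.inr ⟨b, hb, a, ha, ?_⟩
      rw [upair_eq_upair hab.symm]; tauto

-- A's loop is the conjunction of the per-square tests
theorem squaresLoop_eq_all (c1 c2 : PySem.Set Int) (l : List (Int × Int)) :
    squaresLoop c1 c2 l
      = l.all (fun sq => (PySem.Set.contains c1 sq.1 && PySem.Set.contains c2 sq.2)
          || (PySem.Set.contains c1 sq.2 && PySem.Set.contains c2 sq.1)) := by
  induction l with
  | nil => rfl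
  | cons sq rest ih =>
    simp only [squaresLoop, List.all_cons, ih]
    split_ifs with h1 h2 <;> simp_all

-- ===== VERDICT (by name: the statement is the Claim_ definition above) =====
theorem check_cubes_spec : Claim_equal_check_cubes := by
  intro cube_1 cube_2 _
  unfold Spec_check_cubes check_cubes check_cubes_alt
  set c1 := normCube cube_1 with hc1
  set c2 := normCube cube_2 with hc2
  rw [squaresLoop_eq_all]
  unfold pySquares
  simp only [List.all_cons, List.all_nil]
  rw [formable_test c1 c2 0 1 (by decide), formable_test c1 c2 0 4 (by decide),
    formable_test c1 c2 0 9 (by decide), formable_test c1 c2 1 6 (by decide),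
    formable_test c1 c2 2 5 (by decide), formable_test c1 c2 3 6 (by decide),
    formable_test c1 c2 4 9 (by decide), formable_test c1 c2 6 4 (by decide),
    formable_test c1 c2 8 1 (by decide), hc1, hc2,
    normCube_contains cube_1 0 (by decide), normCube_contains cube_1 1 (by decide),
    normCube_contains cube_1 2 (by decide), normCube_contains cube_1 3 (by decide),
    normCube_contains cube_1 4 (by decide), normCube_contains cube_1 5 (by decide),
    normCube_contains cube_1 6 (by decide), normCube_contains cube_1 8 (by decide),
    normCube_contains cube_1 9 (by decide),
    normCube_contains cube_2 0 (by decide), normCube_contains cube_2 1 (by decide),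
    normCube_contains cube_2 2 (by decide), normCube_contains cube_2 3 (by decide),
    normCube_contains cube_2 4 (by decide), normCube_contains cube_2 5 (by decide),
    normCube_contains cube_2 6 (by decide), normCube_contains cube_2 8 (by decide),
    normCube_contains cube_2 9 (by decide)]
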